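-- pv_equiv track=rewrite | github.com/setiastro/setiastrosuitepro | src/setiastro/saspro/blink_comparator_pro.py | _reindex_list_after_remove
-- ===== SOURCE A (Python) =====
-- from typing import Optional, List
--
-- def _reindex_list_after_remove(lst: List[int] | None, removed: List[int]) -> List[int] | None:
--     """Return lst with removed indices dropped and others shifted."""
--     if lst is None:
--         return None
--     from bisect import bisect_right
--     removed = sorted(set(int(i) for i in removed))
--     rset = set(removed)
--     def new_idx(old):
--         return old - bisect_right(removed, old)
--     return [new_idx(i) for i in lst if i not in rset]
-- ===== SOURCE B (Python) =====
-- def _reindex_list_after_remove(lst, removed):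
--     """Return lst with removed indices dropped and others shifted.
--
--     Precomputes a remap table (old surviving index -> new index) by one
--     merge-style pass over the sorted distinct surviving values and the
--     sorted distinct removed values, then emits the output with dict lookups.
--     """
--     if lst is None:
--         return None
--     rem = sorted({int(r) for r in removed})
--     rset = set(rem)
--     keep = sorted({v for v in lst if v not in rset})
--     remap = {}
--     j = 0  # number of removed values <= current v (running pointer over rem)
--     for v in keep:
--         while j < len(rem) and rem[j] <= v:
--             j += 1
--         remap[v] = v - j
--     return [remap[v] for v in lst if v in remap]
-- ===== Notes on version B (the rewrite author's own statement) =====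
-- stated objective: alternative
-- what changed: Instead of a per-element binary search (bisect) over the sorted removed list, B builds a remap dict in one merge-style pass: a running pointer over sorted distinct removed values walks the sorted distinct surviving values, mapping each old index to old minus the count of removed values <= old; the output is then produced by dict lookups.
import Mathlib
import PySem

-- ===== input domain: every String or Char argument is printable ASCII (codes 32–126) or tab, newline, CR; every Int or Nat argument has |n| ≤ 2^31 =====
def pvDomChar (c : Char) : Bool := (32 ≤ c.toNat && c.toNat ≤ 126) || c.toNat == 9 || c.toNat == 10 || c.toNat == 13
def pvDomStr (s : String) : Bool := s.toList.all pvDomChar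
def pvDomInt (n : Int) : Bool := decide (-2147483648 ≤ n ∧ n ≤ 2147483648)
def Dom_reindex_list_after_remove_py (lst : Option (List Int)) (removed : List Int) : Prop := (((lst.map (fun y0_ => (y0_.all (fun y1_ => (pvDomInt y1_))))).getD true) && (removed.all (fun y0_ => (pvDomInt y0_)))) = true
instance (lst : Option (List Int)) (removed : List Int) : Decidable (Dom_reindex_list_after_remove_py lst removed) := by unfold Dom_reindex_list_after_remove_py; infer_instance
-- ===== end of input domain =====

-- B replaces A's per-element bisect with a precomputed remap dict built by one merge-style pass
-- over the sorted distinct surviving and removed values (alternative decomposition, same cost).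


-- ===== PORT A =====
-- removed = sorted(set(int(i) for i in removed)); rset = set(removed);
-- [old - bisect_right(removed, old) for old in lst if old not in rset]
def reindex_list_after_remove_py (lst : Option (List Int)) (removed : List Int) : Option (List Int) :=
  match lst with
  | none => none
  | some l =>
    let removedS : List Int :=
      PySem.List.sorted (PySem.Set.ofList (removed.map (fun i => i))) (fun x => x)
    let rset : PySem.Set Int := PySem.Set.ofList removedS
    let newIdx : Int → Int := fun old => old - (PySem.List.bisectRight removedS old : Int)
    some ((l.filter (fun i => !(PySem.Set.contains rset i))).map newIdx)

-- ===== PORT B =====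
-- the `while j < len(rem) and rem[j] <= v: j += 1` loop of Source B
def pvAdvance (rem : List Int) (v : Int) (j : Nat) : Nat :=
  if h : j < rem.length then
    if rem[j] ≤ v then pvAdvance rem v (j + 1) else j
  else j
termination_by rem.length - j

-- the `for v in keep:` loop of Source B, carrying the pointer j and the dict
def pvBuild (rem : List Int) : List Int → Nat → PySem.Dict Int Int → PySem.Dict Int Int
  | [], _, d => d
  | v :: rest, j, d =>
    let j' := pvAdvance rem v j
    pvBuild rem rest j' (d.insert v (v - (j' : Int)))

def reindex_list_after_remove_py_alt (lst : Option (List Int)) (removed : List Int) : Option (List Int) :=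
  match lst with
  | none => none
  | some l =>
    let rem : List Int :=
      PySem.List.sorted (PySem.Set.ofList (removed.map (fun r => r))) (fun x => x)
    let rset : PySem.Set Int := PySem.Set.ofList rem
    let keep : List Int :=
      PySem.List.sorted (PySem.Set.ofList (l.filter (fun v => !(PySem.Set.contains rset v)))) (fun x => x)
    let remap : PySem.Dict Int Int := pvBuild rem keep 0 PySem.Dict.empty
    -- `[remap[v] for v in lst if v in remap]`: membership test then index = get?
    some (l.filterMap (fun v => remap.get? v))

-- ===== PRECONDITION & SPEC =====
def Spec_reindex_list_after_remove_py (lst : Option (List Int)) (removed : List Int) (out : Option (List Int)) : Prop := out = reindex_list_after_remove_py_alt lst removed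
instance (lst : Option (List Int)) (removed : List Int) (out : Option (List Int)) : Decidable (Spec_reindex_list_after_remove_py lst removed out) := by unfold Spec_reindex_list_after_remove_py; infer_instance

-- ===== CLAIM (what is proved, stated in full; the proofs are below) =====
def Claim_equal_reindex_list_after_remove_py : Prop := ∀ (lst : Option (List Int)) (removed : List Int), Dom_reindex_list_after_remove_py lst removed → Spec_reindex_list_after_remove_py lst removed (reindex_list_after_remove_py lst removed)

-- ===== LEMMAS AND PROOFS =====
-- number of elements ≤ v in a (≤-sorted) list, the common quantity of both ports
lemma pv_cnt_ge (rem : List Int) (v : Int) (hs : rem.Pairwise (· ≤ ·)) (j : Nat)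
    (hj : j < rem.length) (hle : rem[j] ≤ v) :
    j + 1 ≤ rem.countP (fun r => decide (r ≤ v)) := by
  have hsplit := (List.take_append_drop (j + 1) rem).symm
  have htlen : (rem.take (j + 1)).length = j + 1 := by
    simp [List.length_take]; omega
  have htake : (rem.take (j + 1)).countP (fun r => decide (r ≤ v)) = j + 1 := by
    rw [List.countP_eq_length.mpr, htlen]
    intro x hx
    rcases List.mem_iff_getElem.mp hx with ⟨i, hi, rfl⟩
    have hi' : i < rem.length := by
      have := List.length_take_le (j + 1) rem; omega
    rw [List.getElem_take]
    have hij : i ≤ j := by omega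
    have : rem[i] ≤ rem[j] := by
      rcases Nat.lt_or_ge i j with h | h
      · exact List.pairwise_iff_getElem.mp hs i j hi' hj h
      · have : i = j := by omega
        subst this; exact le_refl _
    simp; omega
  calc j + 1 = (rem.take (j + 1)).countP (fun r => decide (r ≤ v)) := htake.symm
    _ ≤ (rem.take (j + 1)).countP (fun r => decide (r ≤ v))
          + (rem.drop (j + 1)).countP (fun r => decide (r ≤ v)) := Nat.le_add_right _ _
    _ = rem.countP (fun r => decide (r ≤ v)) := by
          conv_rhs => rw [hsplit]
          rw [List.countP_append]

lemma pv_cnt_le (rem : List Int) (v : Int) (hs : rem.Pairwise (· ≤ ·)) (j : Nat)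
    (hj : j < rem.length) (hgt : v < rem[j]) :
    rem.countP (fun r => decide (r ≤ v)) ≤ j := by
  have hdrop : (rem.drop j).countP (fun r => decide (r ≤ v)) = 0 := by
    rw [List.countP_eq_zero]
    intro x hx
    rcases List.mem_iff_getElem.mp hx with ⟨i, hi, rfl⟩
    have hi' : j + i < rem.length := by
      have := List.length_drop (l := rem) (i := j); omega
    rw [List.getElem_drop]
    have : rem[j] ≤ rem[j + i] := by
      rcases Nat.eq_zero_or_pos i with h | h
      · subst h; simp
      · exact List.pairwise_iff_getElem.mp hs j (j + i) hj hi' (by omega)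
    simp; omega
  have hsplit := (List.take_append_drop j rem).symm
  have : rem.countP (fun r => decide (r ≤ v))
      = (rem.take j).countP (fun r => decide (r ≤ v)) := by
    conv_lhs => rw [hsplit]
    rw [List.countP_append, hdrop]
    omega
  rw [this]
  calc (rem.take j).countP (fun r => decide (r ≤ v)) ≤ (rem.take j).length :=
        List.countP_le_length
    _ ≤ j := by simp [List.length_take]

-- the while-loop pointer lands exactly on the count of removed values ≤ v
lemma pvAdvance_eq (rem : List Int) (v : Int) (hs : rem.Pairwise (· ≤ ·)) :
    ∀ (j : Nat), j ≤ rem.countP (fun r => decide (r ≤ v)) →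
      pvAdvance rem v j = rem.countP (fun r => decide (r ≤ v)) := by
  have main : ∀ (n j : Nat), rem.length - j ≤ n →
      j ≤ rem.countP (fun r => decide (r ≤ v)) →
      pvAdvance rem v j = rem.countP (fun r => decide (r ≤ v)) := by
    intro n
    induction n with
    | zero =>
      intro j hn hj
      have hlen : rem.length ≤ j := by omega
      have : ¬ j < rem.length := by omega
      rw [pvAdvance, dif_neg this]
      have := List.countP_le_length (p := fun r => decide (r ≤ v)) (l := rem)
      omega
    | succ n ih =>
      intro j hn hj
      by_cases h : j < rem.length
      · rw [pvAdvance, dif_pos h]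
        by_cases hle : rem[j] ≤ v
        · rw [if_pos hle]
          exact ih (j + 1) (by omega) (pv_cnt_ge rem v hs j h hle)
        · rw [if_neg hle]
          have := pv_cnt_le rem v hs j h (by omega)
          omega
      · rw [pvAdvance, dif_neg h]
        have := List.countP_le_length (p := fun r => decide (r ≤ v)) (l := rem)
        omega
  intro j hj
  exact main (rem.length - j) j (le_refl _) hj

-- A's bisect_right computes the same count on the sorted distinct list
lemma pv_bisect_eq (rem : List Int) (v : Int) (hs : rem.Pairwise (· ≤ ·)) :
    PySem.List.bisectRight rem v = rem.countP (fun r => decide (r ≤ v)) := by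
  obtain ⟨hle, hlt, hgt⟩ := PySem.List.bisectRight_spec rem v hs
  set r := PySem.List.bisectRight rem v with hr
  apply Nat.le_antisymm
  · rcases Nat.eq_zero_or_pos r with h | h
    · omega
    · have hr1 : r - 1 < rem.length := by omega
      have := pv_cnt_ge rem v hs (r - 1) hr1 (hlt (r - 1) hr1 (by omega))
      omega
  · rcases Nat.lt_or_ge r rem.length with h | h
    · exact pv_cnt_le rem v hs r h (hgt r h (le_refl _))
    · have := List.countP_le_length (p := fun r => decide (r ≤ v)) (l := rem)
      omega

-- the dict built by B's for-loop, characterised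
lemma pvBuild_get? (rem : List Int) (hrem : rem.Pairwise (· ≤ ·)) :
    ∀ (keep : List Int), keep.Pairwise (· ≤ ·) →
    ∀ (j : Nat) (d : PySem.Dict Int Int),
      (∀ v ∈ keep, j ≤ rem.countP (fun r => decide (r ≤ v))) →
      ∀ (x : Int), (pvBuild rem keep j d).get? x =
        if x ∈ keep then some (x - (rem.countP (fun r => decide (r ≤ x)) : Int))
        else d.get? x := by
  intro keep
  induction keep with
  | nil => intro _ j d _ x; simp [pvBuild]
  | cons v rest ih =>
    intro hk j d hj x
    have hadv : pvAdvance rem v j = rem.countP (fun r => decide (r ≤ v)) :=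
      pvAdvance_eq rem v hrem j (hj v (List.mem_cons_self))
    have hk' : rest.Pairwise (· ≤ ·) := hk.tail
    have hj' : ∀ w ∈ rest, pvAdvance rem v j ≤ rem.countP (fun r => decide (r ≤ w)) := by
      intro w hw
      rw [hadv]
      have hvw : v ≤ w := (List.pairwise_cons.mp hk).1 w hw
      exact List.countP_mono_left (fun x _ hx => by simp at hx ⊢; omega)
    simp only [pvBuild]
    rw [ih hk' (pvAdvance rem v j) _ hj' x]
    by_cases hxr : x ∈ rest
    · simp [hxr, List.mem_cons]
    · by_cases hxv : x = v
      · subst hxv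
        simp [hxr, PySem.Dict.get?_insert_self, hadv]
      · rw [PySem.Dict.get?_insert_of_ne _ _ hxv]
        simp [hxr, hxv, List.mem_cons]

-- [f(i) for i in lst if p(i)] as a filterMap
lemma pv_map_filter (l : List Int) (p : Int → Bool) (f : Int → Int) :
    (l.filter p).map f = l.filterMap (fun v => if p v then some (f v) else none) := by
  induction l with
  | nil => rfl
  | cons a t ih =>
    by_cases h : p a <;> simp [h, ih]

lemma pv_filterMap_congr (l : List Int) (f g : Int → Option Int)
    (h : ∀ v ∈ l, f v = g v) : l.filterMap f = l.filterMap g := by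
  induction l with
  | nil => rfl
  | cons a t ih =>
    simp only [List.filterMap_cons, h a List.mem_cons_self]
    rw [ih (fun v hv => h v (List.mem_cons_of_mem a hv))]

-- ===== VERDICT (by name: the statement is the Claim_ definition above) =====
theorem reindex_list_after_remove_py_spec : Claim_equal_reindex_list_after_remove_py := by
  intro lst removed _
  unfold Spec_reindex_list_after_remove_py
  cases lst with
  | none => rfl
  | some l =>
    show reindex_list_after_remove_py (some l) removed
        = reindex_list_after_remove_py_alt (some l) removed
    unfold reindex_list_after_remove_py reindex_list_after_remove_py_alt
    simp only
    set rem : List Int :=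
      PySem.List.sorted (PySem.Set.ofList (removed.map (fun i => i))) (fun x => x) with hrem
    set p : Int → Bool :=
      fun v => !(PySem.Set.contains (PySem.Set.ofList rem) v) with hp
    set keep : List Int :=
      PySem.List.sorted (PySem.Set.ofList (l.filter p)) (fun x => x) with hkeep
    have hle : rem.Pairwise (· ≤ ·) :=
      (PySem.List.sorted_ofList_pairwise_lt _).imp le_of_lt
    have hkle : keep.Pairwise (· ≤ ·) :=
      (PySem.List.sorted_ofList_pairwise_lt _).imp le_of_lt
    have hmemk : ∀ x, x ∈ keep ↔ (x ∈ l ∧ p x = true) := by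
      intro x
      rw [hkeep, PySem.List.mem_sorted, PySem.Set.mem_ofList, List.mem_filter]
    congr 1
    rw [pv_map_filter]
    apply pv_filterMap_congr
    intro v hv
    rw [pvBuild_get? rem hle keep hkle 0 _ (fun w _ => Nat.zero_le _) v]
    by_cases hpv : p v = true
    · rw [if_pos hpv, if_pos ((hmemk v).mpr ⟨hv, hpv⟩)]
      rw [pv_bisect_eq rem v hle]
    · rw [if_neg hpv, if_neg (fun hk => hpv ((hmemk v).mp hk).2), PySem.Dict.get?_empty]
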